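-- pv_equiv track=rewrite | github.com/goodbetterbestco/paperx | paper_pipeline/reconcile_blocks.py | _token_subsequence_index
-- ===== SOURCE A (Python) =====
-- def _token_subsequence_index(tokens: list[str], needle: list[str]) -> int | None:
--     if not tokens or not needle or len(tokens) < len(needle):
--         return None
--     limit = len(tokens) - len(needle) + 1
--     for index in range(limit):
--         if tokens[index : index + len(needle)] == needle:
--             return index
--     return None
-- ===== SOURCE B (Python) =====
-- def _token_subsequence_index(tokens: list[str], needle: list[str]) -> int | None:
--     # Rabin-Karp: a rolling polynomial hash over per-token hashes filters candidate
--     # offsets; a hash hit is verified by an exact window comparison.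
--     n = len(tokens)
--     m = len(needle)
--     if m == 0 or n < m:
--         return None
--     P = 1000000007
--     BASE = 1000003
--
--     def th(s):
--         h = 0
--         for c in s:
--             h = (h * 131 + ord(c)) % P
--         return h
--
--     tv = [th(t) for t in tokens]
--     target = 0
--     for t in needle:
--         target = (target * BASE + th(t)) % P
--     h = 0
--     for v in tv[:m]:
--         h = (h * BASE + v) % P
--     power = pow(BASE, m - 1, P)
--     hs = [h]
--     for i in range(n - m):
--         h = ((h - tv[i] * power) * BASE + tv[i + m]) % P
--         hs.append(h)
--     for i in range(n - m + 1):
--         if hs[i] == target and tokens[i:i + m] == needle: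
--             return i
--     return None
-- ===== Notes on version B (the rewrite author's own statement) =====
-- stated objective: alternative
-- what changed: Replaces A's naive every-offset slice comparison by Rabin-Karp: per-token hashes, a rolling polynomial window hash maintained in O(1) per offset, and an exact window comparison only on a hash hit.
import Mathlib
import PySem

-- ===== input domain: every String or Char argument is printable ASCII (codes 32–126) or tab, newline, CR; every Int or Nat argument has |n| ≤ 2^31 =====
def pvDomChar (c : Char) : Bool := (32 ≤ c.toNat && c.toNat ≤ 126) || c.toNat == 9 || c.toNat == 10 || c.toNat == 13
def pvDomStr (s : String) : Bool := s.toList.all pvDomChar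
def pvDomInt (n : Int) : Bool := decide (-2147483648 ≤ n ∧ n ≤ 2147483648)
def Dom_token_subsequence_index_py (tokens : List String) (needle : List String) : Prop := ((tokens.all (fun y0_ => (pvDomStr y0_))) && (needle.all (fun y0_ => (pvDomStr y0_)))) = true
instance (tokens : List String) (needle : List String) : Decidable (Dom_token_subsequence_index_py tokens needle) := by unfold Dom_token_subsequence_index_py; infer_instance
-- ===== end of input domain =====

-- B replaces A's every-offset slice comparison by Rabin-Karp (rolling window hash + exact verification on hash hits); alternative algorithm, not claimed faster here.

-- ===== PORT A =====
-- for index in range(limit): if tokens[index : index + len(needle)] == needle: return index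
def tokGoA (tokens : List String) (needle : List String) : List Int → Option Int
  | [] => none
  | i :: rest =>
      if PySem.List.slice tokens (some i) (some (i + (needle.length : Int))) = needle then some i
      else tokGoA tokens needle rest

def token_subsequence_index_py (tokens : List String) (needle : List String) : Option Int :=
  if tokens = [] ∨ needle = [] ∨ tokens.length < needle.length then none
  else
    tokGoA tokens needle
      (PySem.List.pyRange 0 ((tokens.length : Int) - (needle.length : Int) + 1) 1)

-- ===== PORT B =====
-- constants P and BASE of Source B
def tsP : Int := 1000000007
def tsB : Int := 1000003

-- th(s): h = (h * 131 + ord(c)) % P over the characters of s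
def tsTh (s : String) : Int :=
  s.toList.foldl (fun h c => PySem.Int.mod (h * 131 + (c.toNat : Int)) tsP) 0

-- for i in range(n - m + 1): if hs[i] == target and tokens[i:i+m] == needle: return i
def tokScanB (hs : List Int) (target : Int) (tokens needle : List String) : List Int → Option Int
  | [] => none
  | i :: rest =>
      if PySem.List.pyGetD hs i 0 = target ∧
         PySem.List.slice tokens (some i) (some (i + (needle.length : Int))) = needle
      then some i else tokScanB hs target tokens needle rest

def token_subsequence_index_py_alt (tokens : List String) (needle : List String) : Option Int :=
  let n := tokens.length
  let m := needle.length
  if m = 0 ∨ n < m then none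
  else
    let tv := tokens.map tsTh
    let target := needle.foldl (fun a t => PySem.Int.mod (a * tsB + tsTh t) tsP) 0
    let h0 := (PySem.List.slice tv none (some (m : Int))).foldl
                (fun a v => PySem.Int.mod (a * tsB + v) tsP) 0
    let power := PySem.Int.powMod tsB (m - 1) tsP
    let st := (PySem.List.pyRange 0 ((n : Int) - (m : Int)) 1).foldl
      (fun (st : List Int × Int) i =>
        let h' := PySem.Int.mod
          ((st.2 - PySem.List.pyGetD tv i 0 * power) * tsB
             + PySem.List.pyGetD tv (i + (m : Int)) 0) tsP
        (st.1 ++ [h'], h')) ([h0], h0)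
    tokScanB st.1 target tokens needle
      (PySem.List.pyRange 0 ((n : Int) - (m : Int) + 1) 1)

-- ===== PRECONDITION & SPEC =====
def Spec_token_subsequence_index_py (tokens : List String) (needle : List String) (out : Option Int) : Prop := out = token_subsequence_index_py_alt tokens needle
instance (tokens : List String) (needle : List String) (out : Option Int) : Decidable (Spec_token_subsequence_index_py tokens needle out) := by unfold Spec_token_subsequence_index_py; infer_instance

-- ===== CLAIM (what is proved, stated in full; the proofs are below) =====
def Claim_equal_token_subsequence_index_py : Prop := ∀ (tokens : List String) (needle : List String), Dom_token_subsequence_index_py tokens needle → Spec_token_subsequence_index_py tokens needle (token_subsequence_index_py tokens needle)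

-- ===== LEMMAS AND PROOFS =====

-- the hash-accumulation fold with the intermediate % P, and its un-modded shadow
def tsFoldM (a : Int) (l : List Int) : Int :=
  l.foldl (fun a v => PySem.Int.mod (a * tsB + v) tsP) a

def tsFoldP (a : Int) (l : List Int) : Int :=
  l.foldl (fun a v => a * tsB + v) a

-- hash of the window of width m starting at j
def tsW (tv : List Int) (m j : Nat) : Int := tsFoldM 0 ((tv.drop j).take m)

lemma tsP_pos : (0 : Int) < tsP := by decide

lemma tsFoldP_modeq (l : List Int) (a b : Int) (h : a ≡ b [ZMOD tsP]) :
    tsFoldP a l ≡ tsFoldP b l [ZMOD tsP] := by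
  induction l generalizing a b with
  | nil => exact h
  | cons v rest ih =>
      exact ih _ _ ((h.mul_right tsB).add_right v)

lemma tsFoldM_eq (l : List Int) (a : Int) (h : l ≠ []) :
    tsFoldM a l = tsFoldP a l % tsP := by
  induction l generalizing a with
  | nil => exact absurd rfl h
  | cons v rest ih =>
      by_cases hr : rest = []
      · subst hr
        simp [tsFoldM, tsFoldP, PySem.Int.mod_eq_emod_of_pos tsP_pos]
      · have : tsFoldM a (v :: rest) = tsFoldM (PySem.Int.mod (a * tsB + v) tsP) rest := rfl
        rw [this, ih _ hr, PySem.Int.mod_eq_emod_of_pos tsP_pos]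
        have hcong : ((a * tsB + v) % tsP) ≡ (a * tsB + v) [ZMOD tsP] :=
          Int.emod_emod_of_dvd _ dvd_rfl
        have := tsFoldP_modeq rest _ _ hcong
        exact this

lemma tsFoldP_shift (l : List Int) (a : Int) :
    tsFoldP a l = a * tsB ^ l.length + tsFoldP 0 l := by
  induction l generalizing a with
  | nil => simp [tsFoldP]
  | cons v rest ih =>
      have h1 : tsFoldP a (v :: rest) = tsFoldP (a * tsB + v) rest := rfl
      have h2 : tsFoldP 0 (v :: rest) = tsFoldP v rest := by
        simp [tsFoldP]
      rw [h1, h2, ih (a * tsB + v), ih v]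
      simp only [List.length_cons, pow_succ]
      ring

-- A's early-return loop is a first-match foldr over its candidate list.
lemma tokGoA_eq_foldr (tokens needle : List String) (l : List Int) :
    tokGoA tokens needle l =
      l.foldr (fun i acc =>
        if PySem.List.slice tokens (some i) (some (i + (needle.length : Int))) = needle
        then some i else acc) none := by
  induction l with
  | nil => rfl
  | cons i rest ih => simp [tokGoA, ih]

-- B's early-return scan is a first-match foldr over the same candidate list.
lemma tokScanB_eq_foldr (hs : List Int) (target : Int) (tokens needle : List String) (l : List Int) :
    tokScanB hs target tokens needle l =
      l.foldr (fun i acc =>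
        if PySem.List.pyGetD hs i 0 = target ∧
           PySem.List.slice tokens (some i) (some (i + (needle.length : Int))) = needle
        then some i else acc) none := by
  induction l with
  | nil => rfl
  | cons i rest ih => simp [tokScanB, ih]

lemma foldr_first_congr (P Q : Int → Prop) [DecidablePred P] [DecidablePred Q] (l : List Int)
    (h : ∀ i ∈ l, P i ↔ Q i) :
    l.foldr (fun i acc => if P i then some i else acc) none =
      l.foldr (fun i acc => if Q i then some i else acc) none := by
  induction l with
  | nil => rfl
  | cons i rest ih =>
      have hi := h i (List.mem_cons_self ..)
      have hr := ih (fun j hj => h j (List.mem_cons_of_mem _ hj))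
      simp only [List.foldr_cons, hr]
      by_cases hp : P i
      · rw [if_pos hp, if_pos (hi.mp hp)]
      · rw [if_neg hp, if_neg (fun hq => hp (hi.mpr hq))]

-- the rolling-hash update step is exactly the next window's hash
lemma tsW_step (tv : List Int) (m j : Nat) (hm : 0 < m) (hjm : j + m < tv.length) :
    tsW tv m (j + 1) =
      PySem.Int.mod
        ((tsW tv m j - tv.getD j 0 * PySem.Int.powMod tsB (m - 1) tsP) * tsB
           + tv.getD (j + m) 0) tsP := by
  obtain ⟨m', rfl⟩ : ∃ m', m = m' + 1 := ⟨m - 1, by omega⟩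
  have hj : j < tv.length := by omega
  have hjm' : j + 1 + m' < tv.length := by omega
  have htlen : ((tv.drop (j + 1)).take m').length = m' := by
    simp
    omega
  have hwj : (tv.drop j).take (m' + 1) = tv[j] :: (tv.drop (j + 1)).take m' := by
    rw [List.drop_eq_getElem_cons hj, List.take_succ_cons]
  have hwj1 : (tv.drop (j + 1)).take (m' + 1)
      = (tv.drop (j + 1)).take m' ++ [tv[j + 1 + m']] := by
    rw [List.take_add_one]
    have : (tv.drop (j + 1))[m']? = some tv[j + 1 + m'] := by
      rw [List.getElem?_drop]
      exact List.getElem?_eq_getElem (by omega)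
    rw [this]
    rfl
  set t := (tv.drop (j + 1)).take m' with ht
  -- both windows are nonempty, so tsFoldM on them is a plain fold followed by % P
  have hA : tsW tv (m' + 1) j = (tv[j] * tsB ^ m' + tsFoldP 0 t) % tsP := by
    rw [tsW, tsFoldM_eq _ _ (by rw [hwj]; exact List.cons_ne_nil _ _), hwj]
    have h1 : tsFoldP 0 (tv[j] :: t) = tsFoldP tv[j] t := by simp [tsFoldP]
    rw [h1, tsFoldP_shift, htlen]
  have hB : tsW tv (m' + 1) (j + 1) = (tsFoldP 0 t * tsB + tv[j + 1 + m']) % tsP := by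
    rw [tsW, tsFoldM_eq _ _ (by rw [hwj1]; simp), hwj1]
    have h1 : tsFoldP 0 (t ++ [tv[j + 1 + m']]) = tsFoldP (tsFoldP 0 t) [tv[j + 1 + m']] := by
      simp [tsFoldP]
    rw [h1]
    rfl
  rw [show j + (m' + 1) = j + 1 + m' from by omega, hA, hB,
      PySem.Int.mod_eq_emod_of_pos tsP_pos,
      PySem.Int.powMod_eq_emod _ _ tsP_pos,
      List.getD_eq_getElem tv 0 hj, List.getD_eq_getElem tv 0 hjm']
  have h1 : ((tv[j] * tsB ^ m' + tsFoldP 0 t) % tsP) ≡ tv[j] * tsB ^ m' + tsFoldP 0 t [ZMOD tsP] :=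
    Int.emod_emod_of_dvd _ dvd_rfl
  have h2 : (tsB ^ (m' + 1 - 1) % tsP) ≡ tsB ^ m' [ZMOD tsP] := by
    simp only [Nat.add_sub_cancel]
    exact Int.emod_emod_of_dvd _ dvd_rfl
  have h3 : ((tv[j] * tsB ^ m' + tsFoldP 0 t) % tsP
        - tv[j] * (tsB ^ (m' + 1 - 1) % tsP)) * tsB + tv[j + 1 + m']
      ≡ (tv[j] * tsB ^ m' + tsFoldP 0 t - tv[j] * tsB ^ m') * tsB + tv[j + 1 + m'] [ZMOD tsP] :=
    ((h1.sub (h2.mul_left tv[j])).mul_right tsB).add_right _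
  have h4 : (tv[j] * tsB ^ m' + tsFoldP 0 t - tv[j] * tsB ^ m') * tsB + tv[j + 1 + m']
      = tsFoldP 0 t * tsB + tv[j + 1 + m'] := by ring
  rw [h4] at h3
  exact h3.symm

-- the hs-building loop produces exactly the list of window hashes
lemma ts_roll (tv : List Int) (m : Nat) (hm : 0 < m) (hmn : m ≤ tv.length) (k : Nat)
    (hk : k ≤ tv.length - m) :
    (PySem.List.pyRange 0 (k : Int) 1).foldl
      (fun (st : List Int × Int) i =>
        let h' := PySem.Int.mod
          ((st.2 - PySem.List.pyGetD tv i 0 * PySem.Int.powMod tsB (m - 1) tsP) * tsB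
             + PySem.List.pyGetD tv (i + (m : Int)) 0) tsP
        (st.1 ++ [h'], h')) ([tsW tv m 0], tsW tv m 0)
      = ((List.range (k + 1)).map (tsW tv m), tsW tv m k) := by
  induction k with
  | zero =>
      simp [PySem.List.pyRange_one_eq_nil (le_refl (0 : Int))]
  | succ k ih =>
      have hsplit : PySem.List.pyRange 0 ((k + 1 : Nat) : Int) 1
          = PySem.List.pyRange 0 (k : Int) 1 ++ [(k : Int)] := by
        push_cast
        exact PySem.List.pyRange_one_succ_right (by positivity)
      rw [hsplit, List.foldl_append, ih (by omega)]
      simp only [List.foldl_cons, List.foldl_nil]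
      rw [PySem.List.pyGetD_natCast,
          show ((k : Int) + (m : Int)) = ((k + m : Nat) : Int) from by push_cast; ring,
          PySem.List.pyGetD_natCast,
          ← tsW_step tv m k hm (by omega)]
      simp [List.range_succ]

-- slice-window match forces a window-hash match
lemma ts_pred_iff (tokens needle : List String) (i : Int)
    (_hm : 0 < needle.length) (hmn : needle.length ≤ tokens.length)
    (h0 : 0 ≤ i) (h1 : i < (tokens.length : Int) - (needle.length : Int) + 1) :
    (PySem.List.pyGetD ((List.range (tokens.length - needle.length + 1)).map
          (tsW (tokens.map tsTh) needle.length)) i 0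
        = needle.foldl (fun a t => PySem.Int.mod (a * tsB + tsTh t) tsP) 0 ∧
      PySem.List.slice tokens (some i) (some (i + (needle.length : Int))) = needle) ↔
      PySem.List.slice tokens (some i) (some (i + (needle.length : Int))) = needle := by
  constructor
  · exact And.right
  · intro hs
    refine ⟨?_, hs⟩
    obtain ⟨j, rfl⟩ : ∃ j : Nat, i = (j : Int) := ⟨i.toNat, by omega⟩
    have hj : j ≤ tokens.length - needle.length := by omega
    rw [PySem.List.pyGetD_natCast, List.getD_eq_getElem _ 0 (by simp; omega),
        List.getElem_map, List.getElem_range]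
    rw [PySem.List.slice_natCast_add] at hs
    have hw : ((tokens.map tsTh).drop j).take needle.length = needle.map tsTh := by
      rw [
        show ((tokens.map tsTh).drop j) = (tokens.drop j).map tsTh from (List.map_drop ..).symm,
        show ((tokens.drop j).map tsTh).take needle.length = ((tokens.drop j).take needle.length).map tsTh from (List.map_take ..).symm, hs]
    rw [tsW, tsFoldM, hw, List.foldl_map]

-- ===== VERDICT (by name: the statement is the Claim_ definition above) =====
theorem token_subsequence_index_py_spec : Claim_equal_token_subsequence_index_py := by
  intro tokens needle _
  unfold Spec_token_subsequence_index_py token_subsequence_index_py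
  simp only [token_subsequence_index_py_alt]
  by_cases hguard : tokens = [] ∨ needle = [] ∨ tokens.length < needle.length
  · have hg' : needle.length = 0 ∨ tokens.length < needle.length := by
      rcases hguard with h | h | h
      · subst h
        by_cases hn : needle = []
        · left; simp [hn]
        · right; simpa using List.length_pos_of_ne_nil hn
      · left; simp [h]
      · right; exact h
    rw [if_pos hguard, if_pos hg']
  · have hn : needle ≠ [] := fun h => hguard (Or.inr (Or.inl h))
    have hlen : needle.length ≤ tokens.length :=
      le_of_not_gt (fun h => hguard (Or.inr (Or.inr h)))
    have hm : 0 < needle.length := List.length_pos_of_ne_nil hn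
    rw [if_neg hguard, if_neg (by omega)]
    rw [tokGoA_eq_foldr]
    have hh0 : (PySem.List.slice (tokens.map tsTh) none (some ((needle.length : Nat) : Int))).foldl
        (fun a v => PySem.Int.mod (a * tsB + v) tsP) 0
        = tsW (tokens.map tsTh) needle.length 0 := by
      rw [PySem.List.slice_to_natCast, tsW, tsFoldM, List.drop_zero]
    rw [hh0,
        show ((tokens.length : Int) - (needle.length : Int))
          = ((tokens.length - needle.length : Nat) : Int) from by omega,
        ts_roll (tokens.map tsTh) needle.length hm (by simpa using hlen)
          (tokens.length - needle.length) (by simp),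
        tokScanB_eq_foldr]
    refine foldr_first_congr _ _ _ (fun i hi => ?_)
    rw [PySem.List.mem_pyRange_one] at hi
    have hlenmap : (tokens.map tsTh).length = tokens.length := by simp
    exact (ts_pred_iff tokens needle i hm hlen hi.1 (by omega)).symm
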